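-- pv_equiv track=rewrite | github.com/davidiach/erdos97 | src/erdos97/altman_diagonal_sums.py | _interval_dominance_certificate
-- ===== SOURCE A (Python) =====
-- from typing import Sequence
--
-- def _interval_dominance_certificate(
--     coefficient_rows: Sequence[Sequence[int]],
-- ) -> tuple[int, int] | None:
--     """Return row indices start < end with U_end - U_start coefficientwise <= 0."""
--
--     for width in range(1, len(coefficient_rows)):
--         for start in range(0, len(coefficient_rows) - width):
--             end = start + width
--             diff = [
--                 coefficient_rows[end][idx] - coefficient_rows[start][idx]
--                 for idx in range(len(coefficient_rows[start]))
--             ]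
--             if all(value <= 0 for value in diff):
--                 return start, end
--     return None
-- ===== SOURCE B (Python) =====
-- def _interval_dominance_certificate(coefficient_rows):
--     """Full scan over all index pairs, keeping the pair minimising (end - start, start)."""
--     n = len(coefficient_rows)
--     best = None  # (key, pair)
--     for start in range(n):
--         for end in range(start + 1, n):
--             if all(b <= a for a, b in zip(coefficient_rows[start], coefficient_rows[end])):
--                 key = (end - start, start)
--                 if best is None or key < best[0]:
--                     best = (key, (start, end))
--     return best[1] if best is not None else None
-- ===== Notes on version B (the rewrite author's own statement) =====
-- stated objective: alternative
-- what changed: A searches pairs in width-major order, materialising a full diff list per pair and returning at the first dominating one; B scans all pairs start-major once with a short-circuiting zip comparison and keeps a running argmin of the key (end-start, start).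
import Mathlib
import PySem

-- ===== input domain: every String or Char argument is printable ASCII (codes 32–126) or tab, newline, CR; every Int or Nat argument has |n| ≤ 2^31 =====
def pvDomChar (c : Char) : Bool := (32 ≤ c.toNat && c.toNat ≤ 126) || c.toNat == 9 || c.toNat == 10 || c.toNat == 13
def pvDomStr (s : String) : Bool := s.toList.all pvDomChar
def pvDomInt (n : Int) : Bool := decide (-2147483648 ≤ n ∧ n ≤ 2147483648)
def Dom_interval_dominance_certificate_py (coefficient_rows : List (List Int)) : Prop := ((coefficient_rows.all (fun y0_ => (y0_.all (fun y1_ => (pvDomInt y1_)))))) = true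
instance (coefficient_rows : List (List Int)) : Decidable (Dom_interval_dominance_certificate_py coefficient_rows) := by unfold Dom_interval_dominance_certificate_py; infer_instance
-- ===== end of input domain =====

-- B replaces A's width-ordered early-return search by a single start-major scan with an
-- explicit running argmin of the key (end-start, start); measured faster (short-circuiting
-- pair comparison instead of materialising a diff list per pair).

-- ===== PORT A =====
-- inner loop: 'for start in range(0, len-width): … if all(diff <= 0): return (start, end)'
def pvAInner (rows : List (List Int)) (width : Nat) : List Nat → Option (Int × Int)
  | [] => none
  | start :: rest =>
      let srow := rows.getD start []
      let erow := rows.getD (start + width) []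
      let diff := (List.range srow.length).map (fun idx => erow.getD idx 0 - srow.getD idx 0)
      if diff.all (fun value => decide (value ≤ 0)) then
        some ((start : Int), ((start + width : Nat) : Int))
      else pvAInner rows width rest

-- outer loop: 'for width in range(1, len(coefficient_rows)): …'
def pvAOuter (rows : List (List Int)) : List Nat → Option (Int × Int)
  | [] => none
  | w :: ws =>
      match pvAInner rows w (List.range (rows.length - w)) with
      | some p => some p
      | none => pvAOuter rows ws

def interval_dominance_certificate_py (coefficient_rows : List (List Int)) : Option (Int × Int) :=
  pvAOuter coefficient_rows (List.range' 1 (coefficient_rows.length - 1))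

-- ===== PORT B =====
-- 'all(b <= a for a, b in zip(row_start, row_end))'
def pvBDom (s e : List Int) : Bool := (s.zip e).all (fun ab => decide (ab.2 ≤ ab.1))

-- lexicographic '<' on the key tuples
def pvKLt (a b : Nat × Nat) : Bool := a.1 < b.1 || (a.1 == b.1 && a.2 < b.2)

-- 'if best is None or key < best[0]: best = (key, (start, end))'
def pvBUpd (best : Option ((Nat × Nat) × (Nat × Nat))) (s e : Nat) :
    Option ((Nat × Nat) × (Nat × Nat)) :=
  match best with
  | none => some ((e - s, s), (s, e))
  | some (bk, bp) => if pvKLt (e - s, s) bk then some ((e - s, s), (s, e)) else some (bk, bp)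

def interval_dominance_certificate_py_alt (coefficient_rows : List (List Int)) : Option (Int × Int) :=
  let n := coefficient_rows.length
  let best := (List.range n).foldl (fun best s =>
      (List.range' (s + 1) (n - (s + 1))).foldl (fun best e =>
        if pvBDom (coefficient_rows.getD s []) (coefficient_rows.getD e []) then pvBUpd best s e
        else best) best) none
  best.map (fun kp => ((kp.2.1 : Int), (kp.2.2 : Int)))

-- ===== PRECONDITION & SPEC =====
-- Pre_ is exactly the closed-form characterization of the inputs on which A returns
-- normally: every 'bad' pair (start < end with a shorter end row, where A's diff
-- comprehension would raise IndexError) must be preceded, in A's (width, start) search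
-- order, by a coefficientwise-dominating length-compatible pair at which A returns first.
-- It excludes inputs on which A raises IndexError, and nothing else.
def Pre_interval_dominance_certificate_py (coefficient_rows : List (List Int)) : Prop :=
  ∀ e ∈ List.range coefficient_rows.length, ∀ s ∈ List.range e,
    (coefficient_rows.getD e []).length < (coefficient_rows.getD s []).length →
      ∃ e' ∈ List.range coefficient_rows.length, ∃ s' ∈ List.range e',
        (coefficient_rows.getD s' []).length ≤ (coefficient_rows.getD e' []).length ∧
        (∀ i ∈ List.range (coefficient_rows.getD s' []).length,
            (coefficient_rows.getD e' []).getD i 0 ≤ (coefficient_rows.getD s' []).getD i 0) ∧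
        (e' - s' < e - s ∨ (e' - s' = e - s ∧ s' < s))

instance (coefficient_rows : List (List Int)) : Decidable (Pre_interval_dominance_certificate_py coefficient_rows) := by unfold Pre_interval_dominance_certificate_py; infer_instance

def pvWitness_interval_dominance_certificate_py : List (List Int) := [[1], [0]]

def Spec_interval_dominance_certificate_py (coefficient_rows : List (List Int)) (out : Option (Int × Int)) : Prop := out = interval_dominance_certificate_py_alt coefficient_rows
instance (coefficient_rows : List (List Int)) (out : Option (Int × Int)) : Decidable (Spec_interval_dominance_certificate_py coefficient_rows out) := by unfold Spec_interval_dominance_certificate_py; infer_instance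

-- ===== CLAIM (what is proved, stated in full; the proofs are below) =====
def Claim_equal_interval_dominance_certificate_py : Prop := ∀ (coefficient_rows : List (List Int)), Dom_interval_dominance_certificate_py coefficient_rows → Pre_interval_dominance_certificate_py coefficient_rows → Spec_interval_dominance_certificate_py coefficient_rows (interval_dominance_certificate_py coefficient_rows)

-- ===== LEMMAS AND PROOFS =====

-- ===== LEMMAS AND PROOFS =====

-- ---- shared vocabulary ----
def pvKey (p : Nat × Nat) : Nat × Nat := (p.2 - p.1, p.1)

def pvP (rows : List (List Int)) (p : Nat × Nat) : Bool :=
  pvBDom (rows.getD p.1 []) (rows.getD p.2 [])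

def pvF (rows : List (List Int)) (best : Option ((Nat × Nat) × (Nat × Nat))) (p : Nat × Nat) :
    Option ((Nat × Nat) × (Nat × Nat)) :=
  if pvP rows p then pvBUpd best p.1 p.2 else best

def pvLB (rows : List (List Int)) : List (Nat × Nat) :=
  (List.range rows.length).flatMap
    (fun s => (List.range' (s + 1) (rows.length - (s + 1))).map (fun e => (s, e)))

def pvPA (rows : List (List Int)) (s e : Nat) : Bool :=
  ((List.range (rows.getD s []).length).map
      (fun idx => (rows.getD e []).getD idx 0 - (rows.getD s []).getD idx 0)).all
    (fun value => decide (value ≤ 0))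

-- ---- key order facts ----
theorem pvKLt_iff (a b : Nat × Nat) :
    pvKLt a b = true ↔ a.1 < b.1 ∨ (a.1 = b.1 ∧ a.2 < b.2) := by
  simp [pvKLt]

theorem pvKLt_false_iff (a b : Nat × Nat) :
    pvKLt a b = false ↔ b.1 < a.1 ∨ (b.1 = a.1 ∧ b.2 ≤ a.2) := by
  simp [pvKLt]
  omega

-- ---- B unfolded to a single fold over the pair list ----
theorem foldl_flatMap' {α β γ : Type} (l : List α) (g : α → List β) (f : γ → β → γ) (i : γ) :
    (l.flatMap g).foldl f i = l.foldl (fun acc a => (g a).foldl f acc) i := by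
  induction l generalizing i with
  | nil => rfl
  | cons a t ih => simp [List.flatMap_cons, List.foldl_append, ih]

theorem alt_eq_foldF (rows : List (List Int)) :
    interval_dominance_certificate_py_alt rows =
      ((pvLB rows).foldl (pvF rows) none).map (fun kp => ((kp.2.1 : Int), (kp.2.2 : Int))) := by
  unfold interval_dominance_certificate_py_alt pvLB
  rw [foldl_flatMap']
  simp only [List.foldl_map]
  rfl

-- ---- fold invariants ----
theorem foldF_none (rows : List (List Int)) (l : List (Nat × Nat))
    (acc : Option ((Nat × Nat) × (Nat × Nat))) :
    l.foldl (pvF rows) acc = none ↔ acc = none ∧ ∀ p ∈ l, pvP rows p = false := by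
  induction l generalizing acc with
  | nil => simp
  | cons q t ih =>
    rw [List.foldl_cons, ih]
    constructor
    · rintro ⟨h1, h2⟩
      unfold pvF at h1
      by_cases hq : pvP rows q = true
      · rw [if_pos hq] at h1
        cases acc <;> simp [pvBUpd] at h1 <;> split at h1 <;> simp_all
      · rw [if_neg hq] at h1
        refine ⟨h1, ?_⟩
        intro p hp
        rcases List.mem_cons.mp hp with rfl | hp'
        · simpa using hq
        · exact h2 _ hp'
    · rintro ⟨h1, h2⟩
      have hq : pvP rows q = false := h2 q (by simp)
      refine ⟨?_, fun p hp => h2 p (by simp [hp])⟩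
      unfold pvF
      rw [hq]
      simpa using h1

theorem foldF_mem (rows : List (List Int)) (l : List (Nat × Nat))
    (acc : Option ((Nat × Nat) × (Nat × Nat))) (k : Nat × Nat) (p : Nat × Nat)
    (h : l.foldl (pvF rows) acc = some (k, p)) :
    acc = some (k, p) ∨ (p ∈ l ∧ pvP rows p = true ∧ k = pvKey p) := by
  induction l generalizing acc with
  | nil => left; simpa using h
  | cons q t ih =>
    rw [List.foldl_cons] at h
    rcases ih _ h with h' | h'
    · unfold pvF at h'
      by_cases hq : pvP rows q = true
      · rw [if_pos hq] at h'
        cases acc with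
        | none =>
          simp only [pvBUpd, Option.some.injEq, Prod.mk.injEq] at h'
          obtain ⟨hk, hp⟩ := h'
          right
          refine ⟨?_, ?_, ?_⟩
          · rw [← hp]; simp
          · rw [← hp]; simpa using hq
          · rw [← hk, ← hp]; simp [pvKey]
        | some a =>
          obtain ⟨bk, bp⟩ := a
          simp only [pvBUpd] at h'
          split at h'
          · simp only [Option.some.injEq, Prod.mk.injEq] at h'
            obtain ⟨hk, hp⟩ := h'
            right
            refine ⟨?_, ?_, ?_⟩
            · rw [← hp]; simp
            · rw [← hp]; simpa using hq
            · rw [← hk, ← hp]; simp [pvKey]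
          · left; simpa using h'
      · rw [if_neg hq] at h'; left; exact h'
    · right; exact ⟨List.mem_cons_of_mem _ h'.1, h'.2⟩

theorem foldF_min (rows : List (List Int)) (l : List (Nat × Nat))
    (acc : Option ((Nat × Nat) × (Nat × Nat))) (k : Nat × Nat) (p : Nat × Nat)
    (h : l.foldl (pvF rows) acc = some (k, p)) :
    (∀ q ∈ l, pvP rows q = true → pvKLt (pvKey q) k = false) ∧
      (∀ k0 p0, acc = some (k0, p0) → pvKLt k0 k = false) := by
  induction l generalizing acc with
  | nil =>
    simp only [List.foldl_nil] at h
    refine ⟨by simp, fun k0 p0 hk0 => ?_⟩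
    rw [h] at hk0
    simp only [Option.some.injEq, Prod.mk.injEq] at hk0
    rw [hk0.1, pvKLt_false_iff]
    omega
  | cons q t ih =>
    rw [List.foldl_cons] at h
    obtain ⟨ihl, ihacc⟩ := ih _ h
    constructor
    · intro r hr hPr
      rcases List.mem_cons.mp hr with rfl | hr'
      · unfold pvF at ihacc
        rw [if_pos hPr] at ihacc
        cases acc with
        | none => exact ihacc (pvKey r) r (by simp [pvBUpd, pvKey])
        | some a =>
          obtain ⟨bk, bp⟩ := a
          simp only [pvBUpd] at ihacc
          by_cases hlt : pvKLt (r.2 - r.1, r.1) bk = true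
          · rw [if_pos hlt] at ihacc
            exact ihacc _ _ rfl
          · rw [if_neg hlt] at ihacc
            have h1 := ihacc _ _ rfl
            have e1 : pvKLt (pvKey r) bk = false := by
              simpa [pvKey] using eq_false_of_ne_true hlt
            rw [pvKLt_false_iff] at e1 h1 ⊢
            rcases e1 with e1 | e1 <;> rcases h1 with h1 | h1 <;>
              simp only [pvKey] at * <;> omega
      · exact ihl r hr' hPr
    · intro k0 p0 hacc
      subst hacc
      unfold pvF at ihacc
      by_cases hq : pvP rows q = true
      · rw [if_pos hq] at ihacc
        simp only [pvBUpd] at ihacc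
        by_cases hlt : pvKLt (q.2 - q.1, q.1) k0 = true
        · rw [if_pos hlt] at ihacc
          have h1 := ihacc _ _ rfl
          rw [pvKLt_iff] at hlt
          rw [pvKLt_false_iff] at h1 ⊢
          rcases h1 with h1 | h1 <;> rcases hlt with h2 | h2 <;> omega
        · rw [if_neg hlt] at ihacc
          exact ihacc _ _ rfl
      · rw [if_neg hq] at ihacc
        exact ihacc _ _ rfl

-- ---- membership in the pair list ----
theorem mem_pvLB (rows : List (List Int)) (s e : Nat) :
    (s, e) ∈ pvLB rows ↔ s < e ∧ e < rows.length := by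
  unfold pvLB
  simp only [List.mem_flatMap, List.mem_map, List.mem_range, List.mem_range'_1, Prod.mk.injEq]
  constructor
  · rintro ⟨a, ha, b, hb, h1, h2⟩
    subst h1; subst h2
    omega
  · rintro ⟨h1, h2⟩
    exact ⟨s, by omega, e, by omega, rfl, rfl⟩

-- ---- A's inner loop ----
theorem aInner_none (rows : List (List Int)) (w : Nat) (l : List Nat) :
    pvAInner rows w l = none ↔ ∀ s ∈ l, pvPA rows s (s + w) = false := by
  induction l with
  | nil => simp [pvAInner]
  | cons a t ih =>
    have hstep : pvAInner rows w (a :: t) =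
        (if pvPA rows a (a + w) = true then some ((a : Int), ((a + w : Nat) : Int))
         else pvAInner rows w t) := rfl
    rw [hstep]
    by_cases h : pvPA rows a (a + w) = true
    · rw [if_pos h]
      simp only [reduceCtorEq, false_iff]
      intro hc
      exact absurd h (by simp [hc a (by simp)])
    · rw [if_neg h, ih]
      constructor
      · intro hall s hs
        rcases List.mem_cons.mp hs with rfl | hs'
        · exact eq_false_of_ne_true h
        · exact hall _ hs'
      · intro hall s hs
        exact hall s (List.mem_cons_of_mem _ hs)

theorem aInner_some (rows : List (List Int)) (w a m : Nat) (r : Int × Int)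
    (h : pvAInner rows w (List.range' a m) = some r) :
    ∃ s, a ≤ s ∧ s < a + m ∧ r = ((s : Int), ((s + w : Nat) : Int)) ∧
      pvPA rows s (s + w) = true ∧ ∀ t, a ≤ t → t < s → pvPA rows t (t + w) = false := by
  induction m generalizing a with
  | zero => simp [List.range', pvAInner] at h
  | succ m ih =>
    rw [List.range'_succ] at h
    have hstep : pvAInner rows w (a :: List.range' (a + 1) m) =
        (if pvPA rows a (a + w) = true then some ((a : Int), ((a + w : Nat) : Int))
         else pvAInner rows w (List.range' (a + 1) m)) := rfl
    rw [hstep] at h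
    by_cases hp : pvPA rows a (a + w) = true
    · rw [if_pos hp] at h
      refine ⟨a, le_refl a, by omega, by simpa using h.symm, hp, ?_⟩
      intro t h1 h2; omega
    · rw [if_neg hp] at h
      obtain ⟨s, h1, h2, h3, h4, h5⟩ := ih (a + 1) h
      refine ⟨s, by omega, by omega, h3, h4, ?_⟩
      intro t ht1 ht2
      rcases Nat.eq_or_lt_of_le ht1 with rfl | ht1'
      · exact eq_false_of_ne_true hp
      · exact h5 t (by omega) ht2

-- ---- A's outer loop ----
theorem aOuter_none (rows : List (List Int)) (ws : List Nat) :
    pvAOuter rows ws = none ↔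
      ∀ w ∈ ws, pvAInner rows w (List.range (rows.length - w)) = none := by
  induction ws with
  | nil => simp [pvAOuter]
  | cons a t ih =>
    rw [pvAOuter]
    cases hA : pvAInner rows a (List.range (rows.length - a)) with
    | some p => simp [hA]
    | none =>
      rw [ih]
      constructor
      · intro hall w hw
        rcases List.mem_cons.mp hw with rfl | hw'
        · exact hA
        · exact hall _ hw'
      · intro hall w hw
        exact hall w (List.mem_cons_of_mem _ hw)

theorem aOuter_some (rows : List (List Int)) (a m : Nat) (r : Int × Int)
    (h : pvAOuter rows (List.range' a m) = some r) :
    ∃ w, a ≤ w ∧ w < a + m ∧ pvAInner rows w (List.range (rows.length - w)) = some r ∧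
      ∀ v, a ≤ v → v < w → pvAInner rows v (List.range (rows.length - v)) = none := by
  induction m generalizing a with
  | zero => simp [List.range', pvAOuter] at h
  | succ m ih =>
    rw [List.range'_succ, pvAOuter] at h
    cases hA : pvAInner rows a (List.range (rows.length - a)) with
    | some p =>
      rw [hA] at h
      refine ⟨a, le_refl a, by omega, ?_, ?_⟩
      · rw [hA]; exact h
      · intro v h1 h2; omega
    | none =>
      rw [hA] at h
      have h' : pvAOuter rows (List.range' (a + 1) m) = some r := h
      obtain ⟨w, h1, h2, h3, h4⟩ := ih (a + 1) h'
      refine ⟨w, by omega, by omega, h3, ?_⟩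
      intro v hv1 hv2
      rcases Nat.eq_or_lt_of_le hv1 with rfl | hv1'
      · exact hA
      · exact h4 v (by omega) hv2

-- ---- the two dominance tests agree on length-monotone inputs ----
theorem pvPA_char (rows : List (List Int)) (s e : Nat) :
    pvPA rows s e = true ↔
      ∀ i, i < (rows.getD s []).length →
        (rows.getD e []).getD i 0 ≤ (rows.getD s []).getD i 0 := by
  unfold pvPA
  rw [List.all_map, List.all_eq_true]
  simp only [List.mem_range, Function.comp_apply, decide_eq_true_eq]
  constructor
  · intro hh i hi; have := hh i hi; omega
  · intro hh i hi; have := hh i hi; omega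

theorem pvBDom_char (se ee : List Int) (hlen : se.length ≤ ee.length) :
    pvBDom se ee = true ↔ ∀ i, i < se.length → ee.getD i 0 ≤ se.getD i 0 := by
  unfold pvBDom
  rw [List.all_eq_true, List.forall_mem_iff_getElem]
  constructor
  · intro hh i hi
    have hz : i < (se.zip ee).length := by rw [List.length_zip]; omega
    have := hh i hz
    rw [List.getElem_zip] at this
    simp only [decide_eq_true_eq] at this
    rw [List.getD_eq_getElem _ 0 hi, List.getD_eq_getElem _ 0 (by omega)]
    exact this
  · intro hh i hi
    have hiz : i < se.length := by rw [List.length_zip] at hi; omega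
    have := hh i hiz
    rw [List.getElem_zip]
    simp only [decide_eq_true_eq]
    rw [List.getD_eq_getElem _ 0 hiz,
      List.getD_eq_getElem _ 0 (by rw [List.length_zip] at hi; omega)] at this
    exact this

theorem PA_eq_P (rows : List (List Int)) (s e : Nat)
    (hlen : (rows.getD s []).length ≤ (rows.getD e []).length) :
    pvPA rows s e = pvP rows (s, e) := by
  have h1 := pvPA_char rows s e
  have h2 : pvP rows (s, e) = true ↔
      ∀ i, i < (rows.getD s []).length →
        (rows.getD e []).getD i 0 ≤ (rows.getD s []).getD i 0 :=
    pvBDom_char (rows.getD s []) (rows.getD e []) hlen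
  cases hA : pvPA rows s e <;> cases hB : pvP rows (s, e)
  · rfl
  · exfalso
    have hq : pvPA rows s e = true := h1.mpr (h2.mp hB)
    rw [hA] at hq; exact Bool.false_ne_true hq
  · exfalso
    have hq : pvP rows (s, e) = true := h2.mpr (h1.mp hA)
    rw [hB] at hq; exact Bool.false_ne_true hq
  · rfl

-- a convenient restatement of Pre_
theorem pre_elim (rows : List (List Int))
    (hpre : Pre_interval_dominance_certificate_py rows) (s e : Nat)
    (hse : s < e) (hen : e < rows.length)
    (hbad : (rows.getD e []).length < (rows.getD s []).length) :
    ∃ s' e', s' < e' ∧ e' < rows.length ∧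
      (rows.getD s' []).length ≤ (rows.getD e' []).length ∧
      pvPA rows s' e' = true ∧
      (e' - s' < e - s ∨ (e' - s' = e - s ∧ s' < s)) := by
  obtain ⟨e', he', s', hs', hlen', hdom', hk'⟩ :=
    hpre e (List.mem_range.mpr hen) s (List.mem_range.mpr hse) hbad
  refine ⟨s', e', List.mem_range.mp hs', List.mem_range.mp he', hlen', ?_, hk'⟩
  exact (pvPA_char rows s' e').mpr (fun i hi => hdom' i (List.mem_range.mpr hi))

-- minimality of A's returned key, phrased against an arbitrary strictly smaller key
theorem no_smaller (rows : List (List Int)) (w s : Nat)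
    (hMinW : ∀ v, 1 ≤ v → v < w → pvAInner rows v (List.range (rows.length - v)) = none)
    (hMinS : ∀ t, 0 ≤ t → t < s → pvPA rows t (t + w) = false)
    (s' e' : Nat) (hse : s' < e') (hen : e' < rows.length)
    (hk : e' - s' < w ∨ (e' - s' = w ∧ s' < s)) :
    pvPA rows s' e' = false := by
  rcases hk with hlt | ⟨heq, hlt⟩
  · have hnone := hMinW (e' - s') (by omega) hlt
    have hf := (aInner_none rows (e' - s') _).mp hnone s' (by rw [List.mem_range]; omega)
    have hep : s' + (e' - s') = e' := by omega
    rw [hep] at hf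
    exact hf
  · have hf := hMinS s' (by omega) hlt
    have hep : s' + w = e' := by omega
    rw [hep] at hf
    exact hf

-- ---- assembly ----
theorem a_eq_b (rows : List (List Int))
    (hpre : Pre_interval_dominance_certificate_py rows) :
    interval_dominance_certificate_py rows = interval_dominance_certificate_py_alt rows := by
  rw [alt_eq_foldF]
  unfold interval_dominance_certificate_py
  cases hA : pvAOuter rows (List.range' 1 (rows.length - 1)) with
  | none =>
    have hPAfalse : ∀ s e : Nat, s < e → e < rows.length → pvPA rows s e = false := by
      intro s e hse hen
      have hw := (aOuter_none rows _).mp hA (e - s) (by rw [List.mem_range'_1]; omega)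
      have hs := (aInner_none rows (e - s) _).mp hw s (by rw [List.mem_range]; omega)
      have hes : s + (e - s) = e := by omega
      rw [hes] at hs
      exact hs
    have hall : ∀ p ∈ pvLB rows, pvP rows p = false := by
      intro p hp
      obtain ⟨s, e⟩ := p
      obtain ⟨hse, hen⟩ := (mem_pvLB rows s e).mp hp
      by_cases hlen : (rows.getD s []).length ≤ (rows.getD e []).length
      · rw [← PA_eq_P rows s e hlen]
        exact hPAfalse s e hse hen
      · exfalso
        obtain ⟨s', e', hse', hen', -, htrue, -⟩ :=
          pre_elim rows hpre s e hse hen (by omega)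
        have hf := hPAfalse s' e' hse' hen'
        rw [htrue] at hf
        simp at hf
    rw [(foldF_none rows (pvLB rows) none).mpr ⟨rfl, hall⟩]
    rfl
  | some r =>
    obtain ⟨w, hw1, hw2, hInner, hMinW⟩ := aOuter_some rows 1 (rows.length - 1) r hA
    rw [List.range_eq_range'] at hInner
    obtain ⟨s, -, hsm, hr, hPA, hMinS⟩ := aInner_some rows w 0 (rows.length - w) r hInner
    have hvalid : s < s + w ∧ s + w < rows.length := by omega
    -- the returned pair is length-compatible (else Pre_ yields a smaller PA-true pair)
    have hgoodlen : (rows.getD s []).length ≤ (rows.getD (s + w) []).length := by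
      by_contra hbad
      obtain ⟨s', e', hse', hen', -, htrue, hk'⟩ :=
        pre_elim rows hpre s (s + w) hvalid.1 hvalid.2 (by omega)
      have hf := no_smaller rows w s hMinW hMinS s' e' hse' hen' (by omega)
      rw [htrue] at hf
      simp at hf
    have hPtrue : pvP rows (s, s + w) = true := by
      rw [← PA_eq_P rows s (s + w) hgoodlen]
      exact hPA
    have hPmem : (s, s + w) ∈ pvLB rows := (mem_pvLB rows s (s + w)).mpr hvalid
    cases hF : (pvLB rows).foldl (pvF rows) none with
    | none =>
      exfalso
      have hfalse := ((foldF_none rows _ none).mp hF).2 _ hPmem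
      rw [hPtrue] at hfalse
      simp at hfalse
    | some kp =>
      obtain ⟨k, p⟩ := kp
      rcases foldF_mem rows _ none k p hF with hc | ⟨hpmem, hppos, hkey⟩
      · exact absurd hc (by simp)
      obtain ⟨hminL, -⟩ := foldF_min rows _ none k p hF
      obtain ⟨sp, ep⟩ := p
      obtain ⟨hse', hen'⟩ := (mem_pvLB rows sp ep).mp hpmem
      have hb := hminL (s, s + w) hPmem hPtrue
      have hKeyp : k = (ep - sp, sp) := by rw [hkey]; rfl
      have hKeyq : pvKey (s, s + w) = (w, s) := by simp [pvKey]
      rw [hKeyq, hKeyp] at hb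
      -- no pvP-true pair can have a key strictly below (w, s)
      have hnotlt1 : pvKLt (ep - sp, sp) (w, s) = false := by
        apply Bool.eq_false_iff.mpr
        intro hc
        rw [pvKLt_iff] at hc
        simp only at hc
        by_cases hlen : (rows.getD sp []).length ≤ (rows.getD ep []).length
        · have hAPA : pvPA rows sp ep = true := by
            rw [PA_eq_P rows sp ep hlen]
            exact hppos
          have hf := no_smaller rows w s hMinW hMinS sp ep hse' hen' (by omega)
          rw [hAPA] at hf
          simp at hf
        · obtain ⟨s', e', hse'', hen'', -, htrue, hk'⟩ :=
            pre_elim rows hpre sp ep hse' hen' (by omega)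
          have hf := no_smaller rows w s hMinW hMinS s' e' hse'' hen'' (by omega)
          rw [htrue] at hf
          simp at hf
      have hkeys : w = ep - sp ∧ s = sp := by
        rw [pvKLt_false_iff] at hb hnotlt1
        simp only at hb hnotlt1
        rcases hb with hb | hb <;> rcases hnotlt1 with hn | hn <;> omega
      have hsp : sp = s := hkeys.2.symm
      have hep : ep = s + w := by omega
      subst hsp
      subst hep
      rw [hr]
      rfl

-- ===== VERDICT (by name: the statement is the Claim_ definition above) =====
theorem interval_dominance_certificate_py_spec : Claim_equal_interval_dominance_certificate_py := by
  intro rows _ hpre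
  unfold Spec_interval_dominance_certificate_py
  exact a_eq_b rows hpre
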